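-- pv_equiv track=rewrite | github.com/davisr137/HackerRank | interview/string/palindrome/palindrome.py | count_mid_palindrome
-- ===== SOURCE A (Python) =====
-- def get_mid_palindromes_3(s):
--     """
--     Get indices of palindromes of length 3 where all
--     characters are the same except for a different letter
--     in the middle.
--
--     Args:
--         s (str): Our string
--
--     Returns:
--         list of int: Ending indices of palindromes.
--     """
--     index = list()
--     for i in range(2, len(s)):
--         if s[i-2] == s[i] and s[i] != s[i-1]:
--             index.append(i-1)
--     return index
--
-- def is_mid_palindrome(s, mid, side_l):
--     """
--     Check if substring s[mid-side_l:mid+side_l] is a mid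
--     palindrome.
--
--     Args:
--         s (str): Our string.
--         mid (int): Index of middle letter.
--         side_l (int): Number of letters on either side of the
--             middle letter.
--
--     Returns:
--         int: 1 if substring is a mid palindrome, else 0.
--     """
--     if mid - side_l < 0:
--         return 0
--     if mid + side_l >= len(s):
--         return 0
--     if s[mid-side_l] != s[mid+side_l]:
--         return 0
--     if s[mid-side_l+1] != s[mid-side_l]:
--         return 0
--     if s[mid+side_l-1] != s[mid+side_l]:
--         return 0
--     return 1
--
-- def count_mid_palindrome(s):
--     """
--     Count number of mid palindromes (string with all same letters except
--     for middle letter) in string s.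
--
--     Args:
--         s (str)
--
--     Returns:
--         int: Number of mid palindromes.
--     """
--     index = get_mid_palindromes_3(s)
--     count_mid = len(index)
--     side_l = 2
--     while index:
--         remove = list()
--         for mid in index:
--             if not is_mid_palindrome(s, mid, side_l):
--                  remove.append(mid)
--         for mid_r in remove:
--             index.remove(mid_r)
--         count_mid += len(index)
--         side_l += 1
--     return count_mid
-- ===== SOURCE B (Python) =====
-- def count_mid_palindrome(s):
--     """
--     Count mid palindromes (odd-length blocks of one repeated letter with a
--     single different letter in the middle) by expanding around each center
--     once, instead of A's level-by-level worklist with list.remove.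
--     """
--     n = len(s)
--     total = 0
--     for mid in range(1, n - 1):
--         if s[mid - 1] == s[mid + 1] and s[mid] != s[mid - 1]:
--             c = s[mid - 1]
--             k = 1
--             while mid - k - 1 >= 0 and mid + k + 1 < n and s[mid - k - 1] == c and s[mid + k + 1] == c:
--                 k += 1
--             total += k
--     return total
-- ===== Notes on version B (the rewrite author's own statement) =====
-- stated objective: alternative
-- what changed: A grows the side length level by level over a worklist of all centers, repeatedly scanning it and deleting dead centers with list.remove; B visits each center once and expands it to its maximal wing length in a single inner loop, with no worklist and no removals.
import Mathlib
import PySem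

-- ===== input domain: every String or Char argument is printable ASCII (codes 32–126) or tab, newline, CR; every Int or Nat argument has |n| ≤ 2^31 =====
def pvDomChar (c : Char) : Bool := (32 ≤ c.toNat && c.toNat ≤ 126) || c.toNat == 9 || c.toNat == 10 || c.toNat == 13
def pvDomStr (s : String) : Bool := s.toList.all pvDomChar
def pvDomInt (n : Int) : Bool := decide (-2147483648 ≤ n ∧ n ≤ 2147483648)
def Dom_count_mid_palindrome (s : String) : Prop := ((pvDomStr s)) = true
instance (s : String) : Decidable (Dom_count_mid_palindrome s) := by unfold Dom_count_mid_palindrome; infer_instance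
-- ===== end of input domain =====

-- B replaces A's level-by-level worklist (with its list.remove passes) by a single
-- expand-around-each-center pass: a different algorithm of similar cost.

-- ===== PORT A =====
-- get_mid_palindromes_3: indices i-1 for i in range(2, len(s)) with s[i-2]==s[i] and s[i]!=s[i-1]
def get_mid_palindromes_3 (s : String) : List Int :=
  (PySem.List.pyRange 2 (PySem.Str.len s) 1).foldl
    (fun index i =>
      if PySem.Str.pyGet? s (i - 2) = PySem.Str.pyGet? s i ∧
         PySem.Str.pyGet? s i ≠ PySem.Str.pyGet? s (i - 1)
      then index ++ [i - 1] else index) []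

-- is_mid_palindrome, check for check (it returns only 0 or 1, so Python's `not …` is `… = 0`)
def is_mid_palindrome (s : String) (mid side_l : Int) : Int :=
  if mid - side_l < 0 then 0
  else if PySem.Str.len s ≤ mid + side_l then 0
  else if PySem.Str.pyGet? s (mid - side_l) ≠ PySem.Str.pyGet? s (mid + side_l) then 0
  else if PySem.Str.pyGet? s (mid - side_l + 1) ≠ PySem.Str.pyGet? s (mid - side_l) then 0
  else if PySem.Str.pyGet? s (mid + side_l - 1) ≠ PySem.Str.pyGet? s (mid + side_l) then 0
  else 1

-- the `while index:` loop; `fuel` only makes the recursion structural (len(s)+1 is always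
-- enough: a surviving mid needs mid+side_l < len(s), proved in the lemmas below).
-- `index.remove(mid_r)` is PySem.List.remove?; mid_r is always in the list, so `.getD` is exact here.
def while_loop_A (s : String) : Nat → List Int → Int → Int
  | 0, _, _ => 0
  | fuel + 1, index, side_l =>
    if index = [] then 0
    else
      let remove := index.foldl
        (fun r mid => if is_mid_palindrome s mid side_l = 0 then r ++ [mid] else r) []
      let index' := remove.foldl (fun idx mid_r => (PySem.List.remove? idx mid_r).getD idx) index
      (index'.length : Int) + while_loop_A s fuel index' (side_l + 1)

def count_mid_palindrome (s : String) : Int :=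
  let index := get_mid_palindromes_3 s
  (index.length : Int) + while_loop_A s (s.toList.length + 1) index 2

-- ===== PORT B =====
-- the inner `while` of B: expand wing length k while both next characters equal c
def expand_B (s : String) (mid : Int) (c : Option Char) (k : Int) : Int :=
  if h : 0 ≤ mid - k - 1 ∧ mid + k + 1 < PySem.Str.len s ∧
         PySem.Str.pyGet? s (mid - k - 1) = c ∧ PySem.Str.pyGet? s (mid + k + 1) = c
  then expand_B s mid c (k + 1)
  else k
termination_by (PySem.Str.len s - (mid + k)).toNat
decreasing_by
  omega

def count_mid_palindrome_alt (s : String) : Int :=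
  (PySem.List.pyRange 1 (PySem.Str.len s - 1) 1).foldl
    (fun total mid =>
      if PySem.Str.pyGet? s (mid - 1) = PySem.Str.pyGet? s (mid + 1) ∧
         PySem.Str.pyGet? s mid ≠ PySem.Str.pyGet? s (mid - 1)
      then total + expand_B s mid (PySem.Str.pyGet? s (mid - 1)) 1
      else total) 0

-- ===== PRECONDITION & SPEC =====
def Spec_count_mid_palindrome (s : String) (out : Int) : Prop := out = count_mid_palindrome_alt s
instance (s : String) (out : Int) : Decidable (Spec_count_mid_palindrome s out) := by unfold Spec_count_mid_palindrome; infer_instance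

-- ===== CLAIM (what is proved, stated in full; the proofs are below) =====
def Claim_equal_count_mid_palindrome : Prop := ∀ (s : String), Dom_count_mid_palindrome s → Spec_count_mid_palindrome s (count_mid_palindrome s)

-- ===== LEMMAS AND PROOFS =====

-- per-mid survival counter: how many consecutive side lengths from side_l on pass the check
def gcount (s : String) : Nat → Int → Int → Int
  | 0, _, _ => 0
  | fuel + 1, mid, side_l =>
    if is_mid_palindrome s mid side_l = 1 then 1 + gcount s fuel mid (side_l + 1) else 0

lemma is_mid_cases (s : String) (mid side_l : Int) :
    is_mid_palindrome s mid side_l = 0 ∨ is_mid_palindrome s mid side_l = 1 := by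
  unfold is_mid_palindrome; split_ifs <;> simp

-- removing each element of rs (all in idx, both Nodup) is filtering them out
lemma removal_fold (rs : List Int) : ∀ (idx : List Int), idx.Nodup → rs.Nodup →
    (∀ x ∈ rs, x ∈ idx) →
    rs.foldl (fun l y => (PySem.List.remove? l y).getD l) idx
      = idx.filter (fun x => decide (x ∉ rs)) := by
  induction rs with
  | nil => intro idx _ _ _; simp
  | cons r rs ih =>
    intro idx hnd hrs hsub
    have hr : r ∈ idx := hsub r (by simp)
    have hstep : (PySem.List.remove? idx r).getD idx = idx.erase r := by
      rw [PySem.List.remove?_eq_some_erase idx r hr]; rfl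
    simp only [List.foldl_cons, hstep]
    rw [ih (idx.erase r) (hnd.erase r) (List.nodup_cons.mp hrs).2
      (fun x hx => by
        have hne : x ≠ r := fun he => (List.nodup_cons.mp hrs).1 (by rw [← he]; exact hx)
        exact (List.mem_erase_of_ne hne).mpr (hsub x (by simp [hx])))]
    rw [hnd.erase_eq_filter r, List.filter_filter]
    refine List.filter_congr (fun x _ => ?_)
    by_cases h1 : x = r <;> by_cases h2 : x ∈ rs <;> simp [h1, h2]

-- one round of A's loop body produces exactly the filter by "check passes"
lemma round_eq_filter (s : String) (side_l : Int) (idx : List Int) (hnd : idx.Nodup) :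
    (idx.foldl (fun r mid => if is_mid_palindrome s mid side_l = 0 then r ++ [mid] else r) []).foldl
        (fun l y => (PySem.List.remove? l y).getD l) idx
      = idx.filter (fun mid => decide (is_mid_palindrome s mid side_l = 1)) := by
  rw [PySem.List.foldl_append_ite_eq_filter (fun mid => is_mid_palindrome s mid side_l = 0) idx []]
  rw [List.nil_append,
    removal_fold _ idx hnd (hnd.filter _) (fun x hx => (List.mem_filter.mp hx).1)]
  refine List.filter_congr (fun x hx => ?_)
  rcases is_mid_cases s x side_l with h0 | h1
  · simp [h0, List.mem_filter, hx]
  · simp [h1, List.mem_filter, hx]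

lemma sum_map_ite_filter (l : List Int) (p : Int → Prop) [DecidablePred p] (f : Int → Int) :
    (l.map (fun x => if p x then f x else 0)).sum
      = ((l.filter (fun x => decide (p x))).map f).sum := by
  induction l with
  | nil => simp
  | cons x l ih => by_cases h : p x <;> simp [h, ih]

-- unfolding of one loop round (zeta-reduced body)
lemma while_loop_A_succ (s : String) (fuel : Nat) (index : List Int) (side_l : Int) :
    while_loop_A s (fuel + 1) index side_l =
      if index = [] then 0
      else
        ((((index.foldl (fun r mid => if is_mid_palindrome s mid side_l = 0 then r ++ [mid] else r) []).foldl
            (fun idx mid_r => (PySem.List.remove? idx mid_r).getD idx) index).length : Int)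
          + while_loop_A s fuel
              ((index.foldl (fun r mid => if is_mid_palindrome s mid side_l = 0 then r ++ [mid] else r) []).foldl
                (fun idx mid_r => (PySem.List.remove? idx mid_r).getD idx) index) (side_l + 1)) := rfl

-- A's while loop sums the per-mid counters
lemma while_loop_eq_sum (s : String) : ∀ (fuel : Nat) (idx : List Int) (side_l : Int),
    idx.Nodup →
    while_loop_A s fuel idx side_l = (idx.map (fun mid => gcount s fuel mid side_l)).sum := by
  intro fuel
  induction fuel with
  | zero =>
    intro idx side_l _
    simp [while_loop_A, gcount]
  | succ fuel ih =>
    intro idx side_l hnd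
    rw [while_loop_A_succ]
    by_cases hn : idx = []
    · subst hn; simp
    · rw [if_neg hn, round_eq_filter s side_l idx hnd,
        ih (idx.filter (fun mid => decide (is_mid_palindrome s mid side_l = 1))) (side_l + 1) (hnd.filter _)]
      have hg : (idx.map (fun mid => gcount s (fuel + 1) mid side_l)).sum
          = (idx.map (fun mid =>
              if is_mid_palindrome s mid side_l = 1 then 1 + gcount s fuel mid (side_l + 1) else 0)).sum := rfl
      rw [hg, sum_map_ite_filter idx (fun mid => is_mid_palindrome s mid side_l = 1)
            (fun mid => 1 + gcount s fuel mid (side_l + 1)),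
        PySem.List.sum_map_add_int _ (fun _ => (1 : Int)) (fun mid => gcount s fuel mid (side_l + 1)),
        PySem.List.sum_map_const_int]
      ring

-- B's expansion equals 1 + the survival counter, under the wing invariant
lemma expand_eq_gcount (s : String) (mid : Int) : ∀ (fuel : Nat) (k : Int),
    (PySem.Str.len s - (mid + k)).toNat ≤ fuel →
    PySem.Str.pyGet? s (mid - k) = PySem.Str.pyGet? s (mid - 1) →
    PySem.Str.pyGet? s (mid + k) = PySem.Str.pyGet? s (mid - 1) →
    expand_B s mid (PySem.Str.pyGet? s (mid - 1)) k = k + gcount s fuel mid (k + 1) := by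
  intro fuel
  induction fuel with
  | zero =>
    intro k hfuel hl hr
    rw [expand_B, dif_neg (by omega), gcount]
    ring
  | succ fuel ih =>
    intro k hfuel hl hr
    have e1 : mid - (k + 1) = mid - k - 1 := by ring
    have e2 : mid + (k + 1) = mid + k + 1 := by ring
    have e3 : mid - k - 1 + 1 = mid - k := by ring
    have e4 : mid + k + 1 - 1 = mid + k := by ring
    rw [expand_B]
    by_cases hc : 0 ≤ mid - k - 1 ∧ mid + k + 1 < PySem.Str.len s ∧
        PySem.Str.pyGet? s (mid - k - 1) = PySem.Str.pyGet? s (mid - 1) ∧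
        PySem.Str.pyGet? s (mid + k + 1) = PySem.Str.pyGet? s (mid - 1)
    · obtain ⟨h1, h2, h3, h4⟩ := hc
      rw [dif_pos ⟨h1, h2, h3, h4⟩,
        ih (k + 1) (by omega) (by rw [e1]; exact h3) (by rw [e2]; exact h4)]
      have hmid : is_mid_palindrome s mid (k + 1) = 1 := by
        unfold is_mid_palindrome
        rw [e1, e2, e3, e4, if_neg (by omega), if_neg (by omega),
          if_neg (not_not_intro (h3.trans h4.symm)),
          if_neg (not_not_intro (hl.trans h3.symm)),
          if_neg (not_not_intro (hr.trans h4.symm))]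
      have hgc : gcount s (fuel + 1) mid (k + 1)
          = if is_mid_palindrome s mid (k + 1) = 1 then 1 + gcount s fuel mid (k + 1 + 1) else 0 := rfl
      rw [hgc, if_pos hmid]
      ring
    · rw [dif_neg hc]
      have hmid : is_mid_palindrome s mid (k + 1) = 0 := by
        unfold is_mid_palindrome
        rw [e1, e2, e3, e4]
        by_cases b1 : mid - k - 1 < 0
        · rw [if_pos b1]
        · rw [if_neg b1]
          by_cases b2 : PySem.Str.len s ≤ mid + k + 1
          · rw [if_pos b2]
          · rw [if_neg b2]
            by_cases b3 : PySem.Str.pyGet? s (mid - k - 1) = PySem.Str.pyGet? s (mid - 1)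
            · have b4 : PySem.Str.pyGet? s (mid + k + 1) ≠ PySem.Str.pyGet? s (mid - 1) :=
                fun h4 => hc ⟨by omega, by omega, b3, h4⟩
              rw [if_pos (fun he => b4 (he.symm.trans b3))]
            · by_cases b5 : PySem.Str.pyGet? s (mid - k - 1) = PySem.Str.pyGet? s (mid + k + 1)
              · rw [if_neg (not_not_intro b5), if_pos (fun he => b3 (he.symm.trans hl))]
              · rw [if_pos b5]
      have hgc : gcount s (fuel + 1) mid (k + 1)
          = if is_mid_palindrome s mid (k + 1) = 1 then 1 + gcount s fuel mid (k + 1 + 1) else 0 := rfl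
      rw [hgc, hmid]
      simp

-- A's first pass, re-indexed by the middle position: same filter over range(1, n-1)
lemma index_eq (s : String) :
    get_mid_palindromes_3 s
      = (PySem.List.pyRange 1 (PySem.Str.len s - 1) 1).filter
          (fun mid => decide (PySem.Str.pyGet? s (mid - 1) = PySem.Str.pyGet? s (mid + 1) ∧
                              PySem.Str.pyGet? s mid ≠ PySem.Str.pyGet? s (mid - 1))) := by
  unfold get_mid_palindromes_3
  rw [PySem.List.foldl_append_ite
        (fun i => PySem.Str.pyGet? s (i - 2) = PySem.Str.pyGet? s i ∧
                  PySem.Str.pyGet? s i ≠ PySem.Str.pyGet? s (i - 1))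
        (fun i => i - 1), List.nil_append,
      PySem.List.pyRange_one 2 (PySem.Str.len s),
      PySem.List.pyRange_one 1 (PySem.Str.len s - 1)]
  have hn : PySem.Str.len s - 1 - 1 = PySem.Str.len s - 2 := by ring
  rw [hn, List.filter_map, List.filter_map, List.map_map]
  have hfil : ∀ (k : Nat),
      (decide (PySem.Str.pyGet? s (2 + (k : Int) - 2) = PySem.Str.pyGet? s (2 + (k : Int)) ∧
               PySem.Str.pyGet? s (2 + (k : Int)) ≠ PySem.Str.pyGet? s (2 + (k : Int) - 1)))
        = (decide (PySem.Str.pyGet? s (1 + (k : Int) - 1) = PySem.Str.pyGet? s (1 + (k : Int) + 1) ∧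
               PySem.Str.pyGet? s (1 + (k : Int)) ≠ PySem.Str.pyGet? s (1 + (k : Int) - 1))) := by
    intro k
    have a1 : 2 + (k : Int) - 2 = (k : Int) := by ring
    have a2 : 1 + (k : Int) - 1 = (k : Int) := by ring
    have a3 : 1 + (k : Int) + 1 = 2 + (k : Int) := by ring
    have a4 : 2 + (k : Int) - 1 = 1 + (k : Int) := by ring
    rw [a1, a2, a3, a4, decide_eq_decide]
    constructor
    · rintro ⟨a, b⟩
      exact ⟨a, fun h => b (a.symm.trans h.symm)⟩
    · rintro ⟨a, b⟩
      exact ⟨a, fun h => b (h.symm.trans a.symm)⟩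
  have : List.filter ((fun i => decide (PySem.Str.pyGet? s (i - 2) = PySem.Str.pyGet? s i ∧
                  PySem.Str.pyGet? s i ≠ PySem.Str.pyGet? s (i - 1))) ∘ (fun k : Nat => 2 + (k : Int)))
            (List.range (PySem.Str.len s - 2).toNat)
        = List.filter ((fun mid => decide (PySem.Str.pyGet? s (mid - 1) = PySem.Str.pyGet? s (mid + 1) ∧
                  PySem.Str.pyGet? s mid ≠ PySem.Str.pyGet? s (mid - 1))) ∘ (fun k : Nat => 1 + (k : Int)))
            (List.range (PySem.Str.len s - 2).toNat) :=
    List.filter_congr (fun k _ => hfil k)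
  rw [this]
  exact List.map_congr_left (fun k _ => by simp only [Function.comp]; ring)

-- ===== VERDICT (by name: the statement is the Claim_ definition above) =====
theorem count_mid_palindrome_spec : Claim_equal_count_mid_palindrome := by
  intro s _
  unfold Spec_count_mid_palindrome count_mid_palindrome count_mid_palindrome_alt
  rw [index_eq s,
    PySem.List.foldl_ite_eq_foldl_filter
      (fun mid => PySem.Str.pyGet? s (mid - 1) = PySem.Str.pyGet? s (mid + 1) ∧
                  PySem.Str.pyGet? s mid ≠ PySem.Str.pyGet? s (mid - 1))
      (fun total mid => total + expand_B s mid (PySem.Str.pyGet? s (mid - 1)) 1),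
    PySem.List.foldl_add]
  set F := (PySem.List.pyRange 1 (PySem.Str.len s - 1) 1).filter
      (fun mid => decide (PySem.Str.pyGet? s (mid - 1) = PySem.Str.pyGet? s (mid + 1) ∧
                          PySem.Str.pyGet? s mid ≠ PySem.Str.pyGet? s (mid - 1))) with hF
  show (F.length : Int) + while_loop_A s (s.toList.length + 1) F 2
      = 0 + (F.map (fun mid => expand_B s mid (PySem.Str.pyGet? s (mid - 1)) 1)).sum
  rw [while_loop_eq_sum s (s.toList.length + 1) F 2 ((PySem.List.nodup_pyRange_one 1 _).filter _)]
  have hmap : F.map (fun mid => expand_B s mid (PySem.Str.pyGet? s (mid - 1)) 1)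
      = F.map (fun mid => 1 + gcount s (s.toList.length + 1) mid 2) := by
    refine List.map_congr_left (fun mid hmid => ?_)
    rw [hF] at hmid
    have hcond := (List.mem_filter.mp hmid).2
    rw [decide_eq_true_eq] at hcond
    have hrange := PySem.List.mem_pyRange_one.mp (List.mem_filter.mp hmid).1
    have h12 : (1 : Int) + 1 = 2 := by norm_num
    have := expand_eq_gcount s mid (s.toList.length + 1) 1
      (by rw [PySem.Str.len_eq]; omega)
      (by rfl) (hcond.1.symm)
    rw [h12] at this
    exact this
  rw [hmap, PySem.List.sum_map_add_int _ (fun _ => (1 : Int)) (fun mid => gcount s (s.toList.length + 1) mid 2),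
    PySem.List.sum_map_const_int]
  ring
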